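-- pv_equiv track=rewrite | github.com/ekiwi/rtl-repair | scripts/signaldiff.py | find_clock
-- ===== SOURCE A (Python) =====
-- def find_clock(names: list) -> str:
--     candidates = ["clock", "clk"]
--     # sort names from shortest to longest
--     names = sorted(names, key = lambda n: len(n))
--     # check to see if the name could be a clock
--     for name in names:
--         suffix = name.split('.')[-1]
--         if suffix.strip().lower() in candidates:
--             return name
--     raise RuntimeError(f"Failed to find clock among signals: {names}")
-- ===== SOURCE B (Python) =====
-- def find_clock(names: list) -> str:
--     candidates = ["clock", "clk"]
--     best = None
--     for name in names:
--         suffix = name.split('.')[-1]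
--         if suffix.strip().lower() in candidates and (best is None or len(name) < len(best)):
--             best = name
--     if best is None:
--         raise RuntimeError(f"Failed to find clock among signals: {sorted(names, key=len)}")
--     return best
-- ===== Notes on version B (the rewrite author's own statement) =====
-- stated objective: faster
-- what changed: Replaces sort-then-scan (sort all names by length, return the first whose dot-suffix is clock/clk) with a single linear pass that keeps the running shortest matching name using a strict-less update, so the first-seen shortest among equal lengths wins exactly as the stable length sort does.
import Mathlib
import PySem

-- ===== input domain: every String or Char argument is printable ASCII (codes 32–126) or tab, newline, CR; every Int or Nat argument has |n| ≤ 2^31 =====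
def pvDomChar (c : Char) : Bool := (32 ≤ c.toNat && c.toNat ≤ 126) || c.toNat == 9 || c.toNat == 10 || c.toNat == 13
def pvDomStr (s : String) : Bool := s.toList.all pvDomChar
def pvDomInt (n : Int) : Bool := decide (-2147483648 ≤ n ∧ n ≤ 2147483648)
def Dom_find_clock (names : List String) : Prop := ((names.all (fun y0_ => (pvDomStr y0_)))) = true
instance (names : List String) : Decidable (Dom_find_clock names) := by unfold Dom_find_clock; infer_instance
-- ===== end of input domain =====

-- B replaces A's sort-then-scan by a single linear pass keeping the running shortest matching
-- name (strict-less update preserves A's first-seen tie order); Pre_ excludes the inputs where A raises.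


-- ===== PORT A =====
-- suffix = name.split('.')[-1]; suffix.strip().lower() in ["clock", "clk"]
-- (split with a non-empty separator never raises and never returns an empty list,
-- so the .getD [] / pyGetD defaults are never taken)
def pvIsClock (name : String) : Bool :=
  let suffix := PySem.List.pyGetD ((PySem.Str.split? name ".").getD []) (-1) ""
  ["clock", "clk"].contains (PySem.Str.lower (PySem.Str.strip suffix))

-- the 'for name in names: … return name' loop; the empty case is A's raise (excluded by Pre_)
def pvFirstMatch (p : String → Bool) : List String → Option String
  | [] => none
  | n :: rest => if p n then some n else pvFirstMatch p rest

def find_clock (names : List String) : String :=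
  (pvFirstMatch pvIsClock (PySem.List.sorted names (fun n => PySem.Str.len n) false)).getD ""
  -- getD "" is A's raise, excluded by Pre_

-- ===== PORT B =====
def pvStep (p : String → Bool) (best : Option String) (name : String) : Option String :=
  if p name then
    match best with
    | none => some name
    | some b => if PySem.Str.len name < PySem.Str.len b then some name else some b
  else best

def find_clock_alt (names : List String) : String :=
  (names.foldl (pvStep pvIsClock) none).getD ""   -- getD "" is B's raise, excluded by Pre_

-- ===== PRECONDITION & SPEC =====
-- Pre_ excludes exactly the inputs with no clock-suffixed name, on which A raises RuntimeError.
def Pre_find_clock (names : List String) : Prop := names.any pvIsClock = true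
instance (names : List String) : Decidable (Pre_find_clock names) := by unfold Pre_find_clock; infer_instance

def pvWitness_find_clock : List String := ["top.clk", "x"]

def Spec_find_clock (names : List String) (out : String) : Prop := out = find_clock_alt names
instance (names : List String) (out : String) : Decidable (Spec_find_clock names out) := by unfold Spec_find_clock; infer_instance

-- ===== CLAIM (what is proved, stated in full; the proofs are below) =====
def Claim_equal_find_clock : Prop := ∀ (names : List String), Dom_find_clock names → Pre_find_clock names → Spec_find_clock names (find_clock names)

-- ===== LEMMAS AND PROOFS =====

-- unfolding equations of PySem.List.insertBy (definitional)
theorem pvInsertBy_cons (bef : String → String → Bool) (x y : String) (ys : List String) :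
    PySem.List.insertBy bef x (y :: ys)
      = if bef x y then x :: y :: ys else y :: PySem.List.insertBy bef x ys := rfl

theorem pvFirstMatch_mem {p : String → Bool} {b : String} :
    ∀ {S : List String}, pvFirstMatch p S = some b → b ∈ S := by
  intro S
  induction S with
  | nil => simp [pvFirstMatch]
  | cons y ys ih =>
    simp only [pvFirstMatch]
    split_ifs with h
    · intro hb; simp at hb; simp [hb]
    · intro hb; exact List.mem_cons_of_mem _ (ih hb)

-- inserting x into a length-sorted list commutes the first match with B's strict-less update
theorem pvFirstMatch_cons (p : String → Bool) (n : String) (rest : List String) :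
    pvFirstMatch p (n :: rest) = if p n then some n else pvFirstMatch p rest := rfl

theorem pvInsert_firstMatch (p : String → Bool) (x : String) :
    ∀ (S : List String), S.Pairwise (fun a b => PySem.Str.len a ≤ PySem.Str.len b) →
      pvFirstMatch p (PySem.List.insertBy
        (fun a b => decide (PySem.Str.len a < PySem.Str.len b)) x S)
      = pvStep p (pvFirstMatch p S) x := by
  intro S
  induction S with
  | nil =>
    intro _
    simp only [pvFirstMatch, pvStep,
      show ∀ (bef : String → String → Bool) (z : String), PySem.List.insertBy bef z [] = [z]
        from fun _ _ => rfl]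
  | cons y ys ih =>
    intro hp
    have hp' := (List.pairwise_cons.mp hp).2
    have hy : ∀ b ∈ y :: ys, PySem.Str.len y ≤ PySem.Str.len b := by
      intro b hb
      rcases List.mem_cons.mp hb with h | h
      · simp [h]
      · exact (List.pairwise_cons.mp hp).1 b h
    rw [pvInsertBy_cons]
    by_cases hlt : PySem.Str.len x < PySem.Str.len y
    · -- x goes in front of y
      rw [if_pos (by simpa using hlt), pvFirstMatch_cons]
      cases hx : p x with
      | false => simp [pvStep, hx]
      | true =>
        rw [if_pos rfl]
        cases hm : pvFirstMatch p (y :: ys) with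
        | none => simp [pvStep, hx]
        | some b =>
          have hb := hy b (pvFirstMatch_mem hm)
          have hxb : PySem.Str.len x < PySem.Str.len b := lt_of_lt_of_le hlt hb
          have hxb' : (x.length : Int) < (b.length : Int) := by simpa [PySem.Str.len_eq] using hxb
          simp [pvStep, hx]
          intro h; exfalso; omega
    · -- x is inserted in the tail, after y
      have hle : PySem.Str.len y ≤ PySem.Str.len x := not_lt.mp hlt
      rw [if_neg (by simpa using hlt), pvFirstMatch_cons, pvFirstMatch_cons]
      cases hyc : p y with
      | true =>
        -- best stays y: len y ≤ len x, so B's strict-less update keeps y too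
        have hle' : (y.length : Int) ≤ (x.length : Int) := by simpa [PySem.Str.len_eq] using hle
        simp [pvStep]
        intro _ h; exfalso
        have h' : (x.length : Int) < (y.length : Int) := by exact_mod_cast h
        omega
      | false => simpa using ih hp'

theorem pvMain (p : String → Bool) (names : List String) :
    pvFirstMatch p (PySem.List.sorted names (fun n => PySem.Str.len n) false)
      = names.foldl (pvStep p) none := by
  induction names using List.reverseRecOn with
  | nil => rfl
  | append_singleton xs x ih =>
    have hs : PySem.List.sorted (xs ++ [x]) (fun n => PySem.Str.len n) false
        = PySem.List.insertBy (fun a b => decide (PySem.Str.len a < PySem.Str.len b)) x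
            (PySem.List.sorted xs (fun n => PySem.Str.len n) false) := by
      rw [PySem.List.sorted_eq_foldl_insertBy, PySem.List.sorted_eq_foldl_insertBy,
        List.foldl_append]
      rfl
    rw [List.foldl_append, List.foldl_cons, List.foldl_nil, hs,
      pvInsert_firstMatch p x _ (PySem.List.sorted_pairwise xs (fun n => PySem.Str.len n)), ih]

-- ===== VERDICT (by name: the statement is the Claim_ definition above) =====
theorem find_clock_spec : Claim_equal_find_clock := by
  intro names _ _
  unfold Spec_find_clock find_clock find_clock_alt
  rw [pvMain]
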